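-- pv_equiv track=rewrite | github.com/silvinggit-hue/AS_test_tool | workers/request_hub_worker.py | _short_from_writeparam
-- ===== SOURCE A (Python) =====
-- def _short_from_writeparam(qs: dict[str, str]) -> str:
--     if "CAM_HI_TDN_MODE" in qs:
--         v = qs.get("CAM_HI_TDN_MODE", "")
--         return {"0": "TDN A", "2": "TDN D", "3": "TDN N"}.get(v, "TDN")
--     if "CAM_HI_TDN_FILTER" in qs:
--         v = qs.get("CAM_HI_TDN_FILTER", "")
--         return {"0": "ICR A", "1": "ICR ON", "2": "ICR OFF"}.get(v, "ICR")
--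
--     if "SYS_REBOOT" in qs:
--         return "RB"
--     if "SYS_RESET_V2" in qs:
--         return "FR"
--
--     if "SYS_MODELNAME2" in qs:
--         return "MD"
--     if "NET_EXTRA_ID" in qs:
--         return "EX"
--     if "SYS_PRODUCT_MODEL" in qs:
--         return "PM"
--
--     if "SYS_REMOTEUPGRADEUSERINFO" in qs:
--         return "FW TR"
--
--     for k in qs.keys():
--         if k == "action":
--             continue
--         return f"WP {k[:2].upper()}"
--     return "WP"
-- ===== SOURCE B (Python) =====
-- _RANK = {"CAM_HI_TDN_MODE": 0, "CAM_HI_TDN_FILTER": 1, "SYS_REBOOT": 2,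
--          "SYS_RESET_V2": 3, "SYS_MODELNAME2": 4, "NET_EXTRA_ID": 5,
--          "SYS_PRODUCT_MODEL": 6, "SYS_REMOTEUPGRADEUSERINFO": 7}
--
--
-- def _short_from_writeparam(qs):
--     # One pass: keep the lowest-rank (highest-priority) special entry seen,
--     # and the first key != "action" for the fallback; decode the label at the end.
--     best = None
--     first_other = None
--     for k, v in qs.items():
--         r = _RANK.get(k)
--         if r is not None and (best is None or r < best[0]):
--             best = (r, v)
--         if first_other is None and k != "action":
--             first_other = k
--     if best is None:
--         return "WP" if first_other is None else f"WP {first_other[:2].upper()}"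
--     r, v = best
--     if r == 0:
--         return {"0": "TDN A", "2": "TDN D", "3": "TDN N"}.get(v, "TDN")
--     if r == 1:
--         return {"0": "ICR A", "1": "ICR ON", "2": "ICR OFF"}.get(v, "ICR")
--     return {2: "RB", 3: "FR", 4: "MD", 5: "EX", 6: "PM"}.get(r, "FW TR")
-- ===== Notes on version B (the rewrite author's own statement) =====
-- stated objective: alternative
-- what changed: Replaced the priority if/elif chain of membership tests with a single argmin pass: each special key gets a numeric rank, one loop over the items keeps the lowest-rank match (and the first non-'action' key for the fallback), and the label is decoded from the rank afterwards.
import Mathlib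
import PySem

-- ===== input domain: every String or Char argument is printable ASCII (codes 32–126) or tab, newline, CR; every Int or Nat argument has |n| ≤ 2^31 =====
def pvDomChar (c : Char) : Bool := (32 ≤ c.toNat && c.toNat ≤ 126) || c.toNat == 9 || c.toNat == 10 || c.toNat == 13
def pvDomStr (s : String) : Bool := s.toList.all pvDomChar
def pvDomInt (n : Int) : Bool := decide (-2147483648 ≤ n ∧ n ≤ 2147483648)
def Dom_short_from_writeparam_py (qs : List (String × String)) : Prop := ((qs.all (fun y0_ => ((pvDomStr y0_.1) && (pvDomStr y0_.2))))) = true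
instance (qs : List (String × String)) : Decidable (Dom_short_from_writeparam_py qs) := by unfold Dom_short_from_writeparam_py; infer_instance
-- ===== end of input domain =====

-- B replaces A's priority if/elif chain of membership tests by a single argmin pass over the
-- items (lowest-rank special key wins; rank decoded to a label afterwards); objective: alternative.

-- ===== PORT A =====
-- 'for k in qs.keys(): if k == "action": continue; return f"WP {k[:2].upper()}"' then 'return "WP"'
def shortAFallback : List String → String
  | [] => "WP"
  | k :: rest =>
    if k == "action" then shortAFallback rest
    else "WP " ++ PySem.Str.upper (PySem.Str.slice k none (some 2))

-- 'k in qs' on the dict-as-assoc-list; 'qs.get(k, "")' is first-match lookup; the literal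
-- dict '.get(v, dflt)' expressions are ported as the equivalent equality chains.
def short_from_writeparam_py (qs : List (String × String)) : String :=
  if qs.any (fun p => p.1 == "CAM_HI_TDN_MODE") then
    let v := (qs.lookup "CAM_HI_TDN_MODE").getD ""
    if v == "0" then "TDN A" else if v == "2" then "TDN D" else if v == "3" then "TDN N" else "TDN"
  else if qs.any (fun p => p.1 == "CAM_HI_TDN_FILTER") then
    let v := (qs.lookup "CAM_HI_TDN_FILTER").getD ""
    if v == "0" then "ICR A" else if v == "1" then "ICR ON" else if v == "2" then "ICR OFF" else "ICR"
  else if qs.any (fun p => p.1 == "SYS_REBOOT") then "RB"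
  else if qs.any (fun p => p.1 == "SYS_RESET_V2") then "FR"
  else if qs.any (fun p => p.1 == "SYS_MODELNAME2") then "MD"
  else if qs.any (fun p => p.1 == "NET_EXTRA_ID") then "EX"
  else if qs.any (fun p => p.1 == "SYS_PRODUCT_MODEL") then "PM"
  else if qs.any (fun p => p.1 == "SYS_REMOTEUPGRADEUSERINFO") then "FW TR"
  else shortAFallback (qs.map (·.1))

-- ===== PORT B =====
-- _RANK.get(k) on the literal dict, as the equivalent equality chain
def pvRankB (k : String) : Option Nat :=
  if k == "CAM_HI_TDN_MODE" then some 0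
  else if k == "CAM_HI_TDN_FILTER" then some 1
  else if k == "SYS_REBOOT" then some 2
  else if k == "SYS_RESET_V2" then some 3
  else if k == "SYS_MODELNAME2" then some 4
  else if k == "NET_EXTRA_ID" then some 5
  else if k == "SYS_PRODUCT_MODEL" then some 6
  else if k == "SYS_REMOTEUPGRADEUSERINFO" then some 7
  else none

-- one iteration of B's loop: state = (best, first_other)
def pvStepB (s : Option (Nat × String) × Option String) (p : String × String) :
    Option (Nat × String) × Option String :=
  let best :=
    match pvRankB p.1 with
    | none => s.1
    | some r =>
      match s.1 with
      | none => some (r, p.2)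
      | some (rb, vb) => if r < rb then some (r, p.2) else some (rb, vb)
  let fo :=
    match s.2 with
    | some k => some k
    | none => if p.1 == "action" then none else some p.1
  (best, fo)

-- decode the winning rank ('{2: "RB", …}.get(r, "FW TR")' as the equivalent equality chain)
def pvLabelB (r : Nat) (v : String) : String :=
  if r == 0 then
    (if v == "0" then "TDN A" else if v == "2" then "TDN D" else if v == "3" then "TDN N" else "TDN")
  else if r == 1 then
    (if v == "0" then "ICR A" else if v == "1" then "ICR ON" else if v == "2" then "ICR OFF" else "ICR")
  else if r == 2 then "RB"
  else if r == 3 then "FR"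
  else if r == 4 then "MD"
  else if r == 5 then "EX"
  else if r == 6 then "PM"
  else "FW TR"

def short_from_writeparam_py_alt (qs : List (String × String)) : String :=
  match qs.foldl pvStepB (none, none) with
  | (some (r, v), _) => pvLabelB r v
  | (none, none) => "WP"
  | (none, some k) => "WP " ++ PySem.Str.upper (PySem.Str.slice k none (some 2))

-- ===== PRECONDITION & SPEC =====
def Spec_short_from_writeparam_py (qs : List (String × String)) (out : String) : Prop := out = short_from_writeparam_py_alt qs
instance (qs : List (String × String)) (out : String) : Decidable (Spec_short_from_writeparam_py qs out) := by unfold Spec_short_from_writeparam_py; infer_instance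

-- ===== CLAIM (what is proved, stated in full; the proofs are below) =====
def Claim_equal_short_from_writeparam_py : Prop := ∀ (qs : List (String × String)), Dom_short_from_writeparam_py qs → Spec_short_from_writeparam_py qs (short_from_writeparam_py qs)

-- ===== LEMMAS AND PROOFS =====

-- the entry a pair contributes to the argmin
def pvEntry (p : String × String) : Option (Nat × String) :=
  match pvRankB p.1 with
  | none => none
  | some r => some (r, p.2)

-- left-biased 'better of old best and new entry'
def pvMerge (x e : Option (Nat × String)) : Option (Nat × String) :=
  match e with
  | none => x
  | some (r, v) =>
    match x with
    | none => some (r, v)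
    | some (rb, vb) => if r < rb then some (r, v) else some (rb, vb)

-- the argmin over a whole list
def pvMinB (qs : List (String × String)) : Option (Nat × String) :=
  qs.foldl (fun b p => pvMerge b (pvEntry p)) none

-- the fallback first-match
def pvFirstOther : List (String × String) → Option String
  | [] => none
  | p :: qs => if p.1 == "action" then pvFirstOther qs else some p.1

theorem pvMerge_none_left (e : Option (Nat × String)) : pvMerge none e = e := by
  cases e with
  | none => rfl
  | some p => cases p; rfl

theorem pvMerge_none_right (x : Option (Nat × String)) : pvMerge x none = x := rfl

theorem pvMerge_some_some (ra rb : Nat) (va vb : String) :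
    pvMerge (some (ra, va)) (some (rb, vb)) =
      if rb < ra then some (rb, vb) else some (ra, va) := rfl

theorem pvMerge_assoc (a b c : Option (Nat × String)) :
    pvMerge (pvMerge a b) c = pvMerge a (pvMerge b c) := by
  cases a with
  | none => rw [pvMerge_none_left, pvMerge_none_left]
  | some pa =>
    cases b with
    | none => rw [pvMerge_none_right, pvMerge_none_left]
    | some pb =>
      cases c with
      | none => rw [pvMerge_none_right, pvMerge_none_right]
      | some pc =>
        obtain ⟨ra, va⟩ := pa; obtain ⟨rb, vb⟩ := pb; obtain ⟨rc, vc⟩ := pc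
        by_cases h1 : rb < ra <;> by_cases h2 : rc < rb <;> by_cases h3 : rc < ra <;>
          simp [pvMerge_some_some, h1, h2, h3] <;> omega

theorem pvStepB_fst (s : Option (Nat × String) × Option String) (p : String × String) :
    (pvStepB s p).1 = pvMerge s.1 (pvEntry p) := by
  rcases s with ⟨b, fo⟩
  cases hr : pvRankB p.1 with
  | none => simp [pvStepB, pvEntry, hr, pvMerge_none_right]
  | some r =>
    cases b with
    | none => simp [pvStepB, pvEntry, hr, pvMerge_none_left]
    | some q =>
      obtain ⟨rb, vb⟩ := q
      simp [pvStepB, pvEntry, hr, pvMerge_some_some]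

theorem pvFoldMerge_out (qs : List (String × String)) (b : Option (Nat × String)) :
    qs.foldl (fun b p => pvMerge b (pvEntry p)) b = pvMerge b (pvMinB qs) := by
  induction qs generalizing b with
  | nil => rfl
  | cons p qs ih =>
    rw [List.foldl_cons, ih, pvMerge_assoc]
    congr 1
    have hc : pvMinB (p :: qs) =
        List.foldl (fun b q => pvMerge b (pvEntry q)) (pvMerge none (pvEntry p)) qs := rfl
    rw [hc, pvMerge_none_left, ih]

theorem pvMinB_cons (p : String × String) (qs : List (String × String)) :
    pvMinB (p :: qs) = pvMerge (pvEntry p) (pvMinB qs) := by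
  have hc : pvMinB (p :: qs) =
      List.foldl (fun b q => pvMerge b (pvEntry q)) (pvMerge none (pvEntry p)) qs := rfl
  rw [hc, pvMerge_none_left, pvFoldMerge_out]

-- B's fold, componentwise
theorem pvFold_fst (qs : List (String × String)) (s : Option (Nat × String) × Option String) :
    (qs.foldl pvStepB s).1 = pvMerge s.1 (pvMinB qs) := by
  induction qs generalizing s with
  | nil => rfl
  | cons p qs ih =>
    rw [List.foldl_cons, ih, pvStepB_fst, pvMerge_assoc, ← pvMinB_cons]

theorem pvFold_snd (qs : List (String × String)) (s : Option (Nat × String) × Option String) :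
    (qs.foldl pvStepB s).2 = match s.2 with
      | some k => some k
      | none => pvFirstOther qs := by
  induction qs generalizing s with
  | nil => cases hs : s.2 <;> simp [hs, pvFirstOther]
  | cons p qs ih =>
    rw [List.foldl_cons, ih]
    cases hs : s.2 with
    | some k => simp [pvStepB, hs]
    | none =>
      simp only [pvStepB, hs, pvFirstOther]
      by_cases h : p.1 == "action" <;> simp [h]

-- which keys carry which rank
def pvKeyOf : Nat → String
  | 0 => "CAM_HI_TDN_MODE"
  | 1 => "CAM_HI_TDN_FILTER"
  | 2 => "SYS_REBOOT"
  | 3 => "SYS_RESET_V2"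
  | 4 => "SYS_MODELNAME2"
  | 5 => "NET_EXTRA_ID"
  | 6 => "SYS_PRODUCT_MODEL"
  | _ => "SYS_REMOTEUPGRADEUSERINFO"

theorem pvRankB_some {k : String} {r : Nat} (h : pvRankB k = some r) :
    r < 8 ∧ k = pvKeyOf r := by
  unfold pvRankB at h
  split_ifs at h with h0 h1 h2 h3 h4 h5 h6 h7
  · injection h with h'; subst h'; exact ⟨by omega, eq_of_beq h0⟩
  · injection h with h'; subst h'; exact ⟨by omega, eq_of_beq h1⟩
  · injection h with h'; subst h'; exact ⟨by omega, eq_of_beq h2⟩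
  · injection h with h'; subst h'; exact ⟨by omega, eq_of_beq h3⟩
  · injection h with h'; subst h'; exact ⟨by omega, eq_of_beq h4⟩
  · injection h with h'; subst h'; exact ⟨by omega, eq_of_beq h5⟩
  · injection h with h'; subst h'; exact ⟨by omega, eq_of_beq h6⟩
  · injection h with h'; subst h'; exact ⟨by omega, eq_of_beq h7⟩

theorem pvMinB_none (qs : List (String × String))
    (h : ∀ p ∈ qs, pvRankB p.1 = none) : pvMinB qs = none := by
  induction qs with
  | nil => rfl
  | cons p qs ih =>
    rw [pvMinB_cons, ih (fun q hq => h q (List.mem_cons_of_mem _ hq))]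
    simp [pvMerge, pvEntry, h p List.mem_cons_self]

theorem pvMinB_ge (qs : List (String × String)) (r0 : Nat)
    (h : ∀ p ∈ qs, ∀ r, pvRankB p.1 = some r → r0 ≤ r) :
    ∀ r v, pvMinB qs = some (r, v) → r0 ≤ r := by
  induction qs with
  | nil => intro r v hm; simp [pvMinB] at hm
  | cons p qs ih =>
    intro r v hm
    rw [pvMinB_cons] at hm
    have ih' := ih (fun q hq => h q (List.mem_cons_of_mem _ hq))
    cases he : pvEntry p with
    | none =>
      rw [he, pvMerge_none_left] at hm
      exact ih' r v hm
    | some pe =>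
      obtain ⟨re, ve⟩ := pe
      have hre : r0 ≤ re := by
        apply h p List.mem_cons_self
        unfold pvEntry at he
        cases hrk : pvRankB p.1 <;> simp [hrk] at he
        simp [he.1]
      rw [he] at hm
      cases hq : pvMinB qs with
      | none =>
        rw [hq, pvMerge_none_right] at hm
        simp only [Option.some.injEq, Prod.mk.injEq] at hm
        obtain ⟨h1, _⟩ := hm; omega
      | some pq =>
        obtain ⟨rq, vq⟩ := pq
        have hrq := ih' rq vq hq
        rw [hq, pvMerge_some_some] at hm
        split_ifs at hm <;>
          (simp only [Option.some.injEq, Prod.mk.injEq] at hm; obtain ⟨h1, _⟩ := hm; omega)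

theorem pvMinB_spec (qs : List (String × String)) (k0 : String) (r0 : Nat)
    (hk : pvRankB k0 = some r0)
    (hmem : qs.any (fun p => p.1 == k0) = true)
    (hmin : ∀ p ∈ qs, ∀ r, pvRankB p.1 = some r → r0 ≤ r) :
    pvMinB qs = some (r0, (qs.lookup k0).getD "") := by
  induction qs with
  | nil => simp at hmem
  | cons p qs ih =>
    rw [pvMinB_cons]
    by_cases hp : p.1 = k0
    · have he : pvEntry p = some (r0, p.2) := by simp [pvEntry, hp, hk]
      have hlk : ((p :: qs).lookup k0).getD "" = p.2 := by
        obtain ⟨k, v⟩ := p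
        simp at hp
        simp [List.lookup, hp]
      rw [he, hlk]
      cases hq : pvMinB qs with
      | none => rfl
      | some pq =>
        obtain ⟨rq, vq⟩ := pq
        have : r0 ≤ rq :=
          pvMinB_ge qs r0 (fun q hq' => hmin q (List.mem_cons_of_mem _ hq')) rq vq hq
        rw [pvMerge_some_some, if_neg (by omega)]
    · have hmem' : qs.any (fun p => p.1 == k0) = true := by
        simp only [List.any_cons] at hmem
        simpa [show (p.1 == k0) = false by simp [hp]] using hmem
      have ihh := ih hmem' (fun q hq => hmin q (List.mem_cons_of_mem _ hq))
      have hlk : ((p :: qs).lookup k0).getD "" = (qs.lookup k0).getD "" := by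
        obtain ⟨k, v⟩ := p
        simp at hp
        have hbe : (k0 == k) = false := beq_eq_false_iff_ne.mpr (Ne.symm hp)
        simp [List.lookup, hbe]
      rw [ihh, hlk]
      cases he : pvEntry p with
      | none => exact pvMerge_none_left _
      | some pe =>
        obtain ⟨re, ve⟩ := pe
        have hre : pvRankB p.1 = some re := by
          unfold pvEntry at he
          cases hrk : pvRankB p.1 <;> simp [hrk] at he
          simp [he.1]
        have h1 : r0 ≤ re := hmin p List.mem_cons_self re hre
        have h2 : re ≠ r0 := by
          intro hcon
          obtain ⟨_, hkey⟩ := pvRankB_some hre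
          obtain ⟨_, hkey0⟩ := pvRankB_some hk
          exact hp (by rw [hkey, hcon, ← hkey0])
        rw [pvMerge_some_some, if_pos (by omega)]

-- A's fallback loop equals B's first-match over the pairs
theorem shortAFallback_eq (qs : List (String × String)) :
    shortAFallback (qs.map (·.1)) =
      match pvFirstOther qs with
      | none => "WP"
      | some k => "WP " ++ PySem.Str.upper (PySem.Str.slice k none (some 2)) := by
  induction qs with
  | nil => rfl
  | cons p qs ih =>
    simp only [List.map_cons, shortAFallback, pvFirstOther]
    by_cases h : p.1 == "action" <;> simp [h, ih]

-- membership of the special key of rank r, from the absence hypotheses in A's chain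
theorem pvMem_of_rank {qs : List (String × String)} {p : String × String} (hp : p ∈ qs)
    {r : Nat} (hr : pvRankB p.1 = some r) :
    qs.any (fun q => q.1 == pvKeyOf r) = true := by
  obtain ⟨_, hkey⟩ := pvRankB_some hr
  simp only [List.any_eq_true]
  exact ⟨p, hp, by simp [hkey]⟩

-- unfold B on the winning rank
theorem pvAlt_of_minB (qs : List (String × String)) (r : Nat) (v : String)
    (h : pvMinB qs = some (r, v)) :
    short_from_writeparam_py_alt qs = pvLabelB r v := by
  unfold short_from_writeparam_py_alt
  rcases hsp : qs.foldl pvStepB (none, none) with ⟨a, b⟩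
  have ha : a = some (r, v) := by
    have hf := pvFold_fst qs (none, none)
    rw [hsp, pvMerge_none_left, h] at hf
    exact hf
  subst ha
  cases b <;> rfl

theorem pvAlt_of_none (qs : List (String × String)) (h : pvMinB qs = none) :
    short_from_writeparam_py_alt qs =
      match pvFirstOther qs with
      | none => "WP"
      | some k => "WP " ++ PySem.Str.upper (PySem.Str.slice k none (some 2)) := by
  unfold short_from_writeparam_py_alt
  rcases hsp : qs.foldl pvStepB (none, none) with ⟨a, b⟩
  have ha : a = none := by
    have hf := pvFold_fst qs (none, none)
    rw [hsp, pvMerge_none_left, h] at hf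
    exact hf
  have hb : b = pvFirstOther qs := by
    have hf := pvFold_snd qs (none, none)
    rw [hsp] at hf
    exact hf
  subst ha
  subst hb
  cases pvFirstOther qs <;> rfl

-- ===== VERDICT (by name: the statement is the Claim_ definition above) =====
theorem short_from_writeparam_py_spec : Claim_equal_short_from_writeparam_py := by
  intro qs _
  unfold Spec_short_from_writeparam_py
  unfold short_from_writeparam_py
  by_cases h0 : qs.any (fun p => p.1 == "CAM_HI_TDN_MODE") = true
  · rw [if_pos h0,
      pvAlt_of_minB qs 0 _ (pvMinB_spec qs "CAM_HI_TDN_MODE" 0 rfl h0 (fun p _ r _ => Nat.zero_le r))]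
    rfl
  rw [if_neg h0]
  by_cases h1 : qs.any (fun p => p.1 == "CAM_HI_TDN_FILTER") = true
  · have hmin : ∀ p ∈ qs, ∀ r, pvRankB p.1 = some r → 1 ≤ r := by
      intro p hp r hr
      by_contra hcon
      have hlt : r < 1 := by omega
      interval_cases r
      · exact h0 (pvMem_of_rank hp hr)
    rw [if_pos h1, pvAlt_of_minB qs 1 _ (pvMinB_spec qs "CAM_HI_TDN_FILTER" 1 rfl h1 hmin)]
    rfl
  rw [if_neg h1]
  by_cases h2 : qs.any (fun p => p.1 == "SYS_REBOOT") = true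
  · have hmin : ∀ p ∈ qs, ∀ r, pvRankB p.1 = some r → 2 ≤ r := by
      intro p hp r hr
      by_contra hcon
      have hlt : r < 2 := by omega
      interval_cases r
      · exact h0 (pvMem_of_rank hp hr)
      · exact h1 (pvMem_of_rank hp hr)
    rw [if_pos h2, pvAlt_of_minB qs 2 _ (pvMinB_spec qs "SYS_REBOOT" 2 rfl h2 hmin)]
    rfl
  rw [if_neg h2]
  by_cases h3 : qs.any (fun p => p.1 == "SYS_RESET_V2") = true
  · have hmin : ∀ p ∈ qs, ∀ r, pvRankB p.1 = some r → 3 ≤ r := by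
      intro p hp r hr
      by_contra hcon
      have hlt : r < 3 := by omega
      interval_cases r
      · exact h0 (pvMem_of_rank hp hr)
      · exact h1 (pvMem_of_rank hp hr)
      · exact h2 (pvMem_of_rank hp hr)
    rw [if_pos h3, pvAlt_of_minB qs 3 _ (pvMinB_spec qs "SYS_RESET_V2" 3 rfl h3 hmin)]
    rfl
  rw [if_neg h3]
  by_cases h4 : qs.any (fun p => p.1 == "SYS_MODELNAME2") = true
  · have hmin : ∀ p ∈ qs, ∀ r, pvRankB p.1 = some r → 4 ≤ r := by
      intro p hp r hr
      by_contra hcon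
      have hlt : r < 4 := by omega
      interval_cases r
      · exact h0 (pvMem_of_rank hp hr)
      · exact h1 (pvMem_of_rank hp hr)
      · exact h2 (pvMem_of_rank hp hr)
      · exact h3 (pvMem_of_rank hp hr)
    rw [if_pos h4, pvAlt_of_minB qs 4 _ (pvMinB_spec qs "SYS_MODELNAME2" 4 rfl h4 hmin)]
    rfl
  rw [if_neg h4]
  by_cases h5 : qs.any (fun p => p.1 == "NET_EXTRA_ID") = true
  · have hmin : ∀ p ∈ qs, ∀ r, pvRankB p.1 = some r → 5 ≤ r := by
      intro p hp r hr
      by_contra hcon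
      have hlt : r < 5 := by omega
      interval_cases r
      · exact h0 (pvMem_of_rank hp hr)
      · exact h1 (pvMem_of_rank hp hr)
      · exact h2 (pvMem_of_rank hp hr)
      · exact h3 (pvMem_of_rank hp hr)
      · exact h4 (pvMem_of_rank hp hr)
    rw [if_pos h5, pvAlt_of_minB qs 5 _ (pvMinB_spec qs "NET_EXTRA_ID" 5 rfl h5 hmin)]
    rfl
  rw [if_neg h5]
  by_cases h6 : qs.any (fun p => p.1 == "SYS_PRODUCT_MODEL") = true
  · have hmin : ∀ p ∈ qs, ∀ r, pvRankB p.1 = some r → 6 ≤ r := by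
      intro p hp r hr
      by_contra hcon
      have hlt : r < 6 := by omega
      interval_cases r
      · exact h0 (pvMem_of_rank hp hr)
      · exact h1 (pvMem_of_rank hp hr)
      · exact h2 (pvMem_of_rank hp hr)
      · exact h3 (pvMem_of_rank hp hr)
      · exact h4 (pvMem_of_rank hp hr)
      · exact h5 (pvMem_of_rank hp hr)
    rw [if_pos h6, pvAlt_of_minB qs 6 _ (pvMinB_spec qs "SYS_PRODUCT_MODEL" 6 rfl h6 hmin)]
    rfl
  rw [if_neg h6]
  by_cases h7 : qs.any (fun p => p.1 == "SYS_REMOTEUPGRADEUSERINFO") = true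
  · have hmin : ∀ p ∈ qs, ∀ r, pvRankB p.1 = some r → 7 ≤ r := by
      intro p hp r hr
      by_contra hcon
      have hlt : r < 7 := by omega
      interval_cases r
      · exact h0 (pvMem_of_rank hp hr)
      · exact h1 (pvMem_of_rank hp hr)
      · exact h2 (pvMem_of_rank hp hr)
      · exact h3 (pvMem_of_rank hp hr)
      · exact h4 (pvMem_of_rank hp hr)
      · exact h5 (pvMem_of_rank hp hr)
      · exact h6 (pvMem_of_rank hp hr)
    rw [if_pos h7, pvAlt_of_minB qs 7 _ (pvMinB_spec qs "SYS_REMOTEUPGRADEUSERINFO" 7 rfl h7 hmin)]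
    rfl
  rw [if_neg h7]
  have hnone : pvMinB qs = none := by
    apply pvMinB_none
    intro p hp
    cases hr : pvRankB p.1 with
    | none => rfl
    | some r =>
      exfalso
      have hr8 := (pvRankB_some hr).1
      interval_cases r
      · exact h0 (pvMem_of_rank hp hr)
      · exact h1 (pvMem_of_rank hp hr)
      · exact h2 (pvMem_of_rank hp hr)
      · exact h3 (pvMem_of_rank hp hr)
      · exact h4 (pvMem_of_rank hp hr)
      · exact h5 (pvMem_of_rank hp hr)
      · exact h6 (pvMem_of_rank hp hr)
      · exact h7 (pvMem_of_rank hp hr)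
  rw [pvAlt_of_none qs hnone, shortAFallback_eq]
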